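-- pv_equiv track=rewrite | github.com/T-Dynamos/Coding | Python/slant_pixel_sequence.py | get_slant_pixel_map
-- ===== SOURCE A (Python) =====
-- def mean(*colors):
--     st = ""
--     for c in colors:
--         if c:
--             st += c + "|"
--     return st[:-1]
--
-- def get_slant_pixel_map(colors):
--     len_colors = len(colors)
--     color_map = [None] * (len_colors**2)
--     current_pixel = 0
--     for color in range(len_colors):
--         color_map[current_pixel] = colors[color]
--         current_pixel += len_colors + 1
--     slant_pixel_sequence = [
--         [i, i + ((len_colors - 1) * k)]
--         for k in range(1, len_colors + 1)
--         for i in range(k, len_colors**2 - (len_colors * k), len_colors + 1)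
--     ]
--     for pixel in slant_pixel_sequence:
--         color_map[pixel[0]] = mean(
--             color_map[pixel[0] - 1], color_map[pixel[0] + len_colors]
--         )
--         color_map[pixel[1]] = mean(
--             color_map[pixel[1] + 1], color_map[pixel[1] - len_colors]
--         )
--     return color_map
-- ===== SOURCE B (Python) =====
-- def mean(*colors):
--     st = ""
--     for c in colors:
--         if c:
--             st += c + "|"
--     return st[:-1]
--
-- def get_slant_pixel_map(colors):
--     n = len(colors)
--
--     def upper(d, r):
--         # color of the pixel at (row r, column r + d), d >= 0
--         if d == 0:
--             return colors[r]
--         return mean(upper(d - 1, r), upper(d - 1, r + 1))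
--
--     def lower(d, c):
--         # color of the pixel at (row c + d, column c), d >= 0
--         if d == 0:
--             return colors[c]
--         return mean(lower(d - 1, c + 1), lower(d - 1, c))
--
--     return [upper(c - r, r) if r <= c else lower(r - c, c)
--             for r in range(n) for c in range(n)]
-- ===== Notes on version B (the rewrite author's own statement) =====
-- stated objective: simpler
-- what changed: A precomputes a flat slant_pixel_sequence of array indices and fills a one-dimensional color_map in place index by index; B instead defines each pixel directly by a recursive function cell(r, c) that blends its two neighbours one step closer to the diagonal, and builds the result with a nested comprehension.
import Mathlib
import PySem

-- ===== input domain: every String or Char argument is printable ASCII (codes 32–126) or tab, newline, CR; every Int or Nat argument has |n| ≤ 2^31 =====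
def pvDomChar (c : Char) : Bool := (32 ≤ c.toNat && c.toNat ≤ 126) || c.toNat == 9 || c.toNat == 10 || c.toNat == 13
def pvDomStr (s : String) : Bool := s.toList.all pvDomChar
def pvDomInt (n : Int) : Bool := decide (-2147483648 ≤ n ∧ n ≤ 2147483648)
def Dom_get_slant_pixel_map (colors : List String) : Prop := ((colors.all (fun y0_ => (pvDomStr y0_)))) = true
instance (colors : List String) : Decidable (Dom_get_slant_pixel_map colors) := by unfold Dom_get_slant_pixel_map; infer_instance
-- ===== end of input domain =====

-- B replaces A's flat array with its precomputed slant index sequence by a direct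
-- recursive definition of each pixel's color; objective: simpler, not faster.


-- ===== PORT A =====
-- mean(*colors): arguments here are slots of color_map (Option String); None and "" are falsy.
-- The string is built on the List Char side (PySem.Chars); st[:-1] is the slice st[:-1].
def meanA (cs : List (Option String)) : String :=
  String.ofList (PySem.List.slice
    (cs.foldl (fun st c =>
      match c with
      | none => st
      | some s => if s.toList = [] then st else st ++ s.toList ++ ['|']) ([] : List Char))
    none (some (-1)))

-- one iteration of A's main loop over slant_pixel_sequence (pixel = (p.1, p.2)).
-- pyGetD …/pySetD make the indexing total; every index A uses is in range.
def stepA (len : Int) (cm : List (Option String)) (p : Int × Int) : List (Option String) :=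
  let cm1 := PySem.List.pySetD cm p.1
    (some (meanA [PySem.List.pyGetD cm (p.1 - 1) none, PySem.List.pyGetD cm (p.1 + len) none]))
  PySem.List.pySetD cm1 p.2
    (some (meanA [PySem.List.pyGetD cm1 (p.2 + 1) none, PySem.List.pyGetD cm1 (p.2 - len) none]))

-- body of the diagonal loop: color_map[current_pixel] = colors[color]; current_pixel += len+1
def initStep (len : Int) (colors : List String) (st : List (Option String) × Int) (c : Int) :
    List (Option String) × Int :=
  (PySem.List.pySetD st.1 st.2 (PySem.List.pyGet? colors c), st.2 + (len + 1))

def get_slant_pixel_map (colors : List String) : List (Option String) :=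
  let len : Int := colors.length
  -- color_map = [None] * (len_colors**2); the diagonal loop carries (color_map, current_pixel)
  let init := (PySem.List.pyRange 0 len 1).foldl (initStep len colors)
      (PySem.List.pyRepeat [none] (len ^ 2), 0)
  let seq : List (Int × Int) := (PySem.List.pyRange 1 (len + 1) 1).flatMap
      (fun k => (PySem.List.pyRange k (len ^ 2 - len * k) (len + 1)).map
        (fun i => (i, i + (len - 1) * k)))
  seq.foldl (stepA len) init.1

-- ===== PORT B =====
-- mean(*colors) as B calls it: plain strings; "" is falsy.
def meanB (ss : List String) : String :=
  String.ofList (PySem.List.slice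
    (ss.foldl (fun st s => if s.toList = [] then st else st ++ s.toList ++ ['|']) ([] : List Char))
    none (some (-1)))

-- upper(d, r): color of the pixel at (r, r + d); colors[r] is pyGet? (none = IndexError,
-- propagated through the match)
def cellUp (colors : List String) : Nat → Nat → Option String
  | 0, r => PySem.List.pyGet? colors (r : Int)
  | d + 1, r =>
    match cellUp colors d r, cellUp colors d (r + 1) with
    | some a, some b => some (meanB [a, b])
    | _, _ => none

-- lower(d, c): color of the pixel at (c + d, c)
def cellDown (colors : List String) : Nat → Nat → Option String
  | 0, c => PySem.List.pyGet? colors (c : Int)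
  | d + 1, c =>
    match cellDown colors d (c + 1), cellDown colors d c with
    | some a, some b => some (meanB [a, b])
    | _, _ => none

def get_slant_pixel_map_alt (colors : List String) : List (Option String) :=
  (List.range colors.length).flatMap
    (fun r => (List.range colors.length).map
      (fun c => if r ≤ c then cellUp colors (c - r) r else cellDown colors (r - c) c))

-- ===== PRECONDITION & SPEC =====
def Spec_get_slant_pixel_map (colors : List String) (out : List (Option String)) : Prop := out = get_slant_pixel_map_alt colors
instance (colors : List String) (out : List (Option String)) : Decidable (Spec_get_slant_pixel_map colors out) := by unfold Spec_get_slant_pixel_map; infer_instance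

-- ===== CLAIM (what is proved, stated in full; the proofs are below) =====
def Claim_equal_get_slant_pixel_map : Prop := ∀ (colors : List String), Dom_get_slant_pixel_map colors → Spec_get_slant_pixel_map colors (get_slant_pixel_map colors)

-- ===== LEMMAS AND PROOFS =====

def gridOf (n : Nat) (f : Nat → Nat → Option String) : List (Option String) :=
  (List.range n).flatMap (fun r => (List.range n).map (f r))

theorem length_gridOf (n : Nat) (f : Nat → Nat → Option String) :
    (gridOf n f).length = n * n := by
  simp [gridOf, List.length_flatMap, List.map_const', List.sum_replicate]

theorem flat_get {α : Type} (rs : List Nat) (n : Nat) (f : Nat → Nat → α) (j c : Nat)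
    (hj : j < rs.length) (hc : c < n) :
    (rs.flatMap (fun r => (List.range n).map (f r)))[j * n + c]? = some (f rs[j] c) := by
  induction rs generalizing j with
  | nil => simp at hj
  | cons r rs ih =>
    cases j with
    | zero =>
      rw [List.flatMap_cons, List.getElem?_append_left (by simpa using hc)]
      simp [List.getElem?_range hc]
    | succ j =>
      rw [List.flatMap_cons, List.getElem?_append_right (by simp; nlinarith)]
      have he : (j + 1) * n + c - (List.map (f r) (List.range n)).length = j * n + c := by
        simp; ring_nf; omega
      rw [he, ih j (by simpa using hj)]
      simp

theorem gridOf_get (n : Nat) (f : Nat → Nat → Option String) {r c : Nat}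
    (hr : r < n) (hc : c < n) : (gridOf n f)[r * n + c]? = some (f r c) := by
  have := flat_get (List.range n) n f r c (by simpa using hr) hc
  simpa [gridOf] using this

theorem gridOf_get_div_mod (n : Nat) (f : Nat → Nat → Option String) {q : Nat}
    (hq : q < n * n) : (gridOf n f)[q]? = some (f (q / n) (q % n)) := by
  have hn : 0 < n := by by_contra h; simp [Nat.eq_zero_of_not_pos h] at hq
  have h1 : q / n < n := Nat.div_lt_of_lt_mul hq
  have h2 : q % n < n := Nat.mod_lt _ hn
  have h3 : q / n * n + q % n = q := by rw [Nat.mul_comm]; exact Nat.div_add_mod q n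
  have h4 := gridOf_get n f h1 h2
  rw [h3] at h4; exact h4

theorem gridOf_congr {n : Nat} {f g : Nat → Nat → Option String}
    (h : ∀ r c, r < n → c < n → f r c = g r c) : gridOf n f = gridOf n g := by
  apply List.ext_getElem?
  intro i
  by_cases hi : i < n * n
  · have hn : 0 < n := by by_contra hh; simp [Nat.eq_zero_of_not_pos hh] at hi
    rw [gridOf_get_div_mod n f hi, gridOf_get_div_mod n g hi,
      h _ _ (Nat.div_lt_of_lt_mul hi) (Nat.mod_lt _ hn)]
  · rw [List.getElem?_eq_none (by rw [length_gridOf]; omega),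
      List.getElem?_eq_none (by rw [length_gridOf]; omega)]

theorem gridOf_getD {n : Nat} (f : Nat → Nat → Option String) {r c : Nat}
    (hr : r < n) (hc : c < n) :
    PySem.List.pyGetD (gridOf n f) ((r * n + c : Nat) : Int) none = f r c := by
  rw [PySem.List.pyGetD_natCast, List.getD_eq_getElem?_getD, gridOf_get n f hr hc]
  rfl

theorem rc_lt (n r c : Nat) (hr : r < n) (hc : c < n) : r * n + c < n * n := by
  calc r * n + c < r * n + n := by omega
  _ = (r + 1) * n := by ring
  _ ≤ n * n := Nat.mul_le_mul_right n hr

theorem gridOf_set {n : Nat} (f : Nat → Nat → Option String) {r c : Nat}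
    (hr : r < n) (hc : c < n) (v : Option String) :
    (gridOf n f).set (r * n + c) v
      = gridOf n (fun r' c' => if r' = r ∧ c' = c then v else f r' c') := by
  have hn : 0 < n := by omega
  apply List.ext_getElem?
  intro i
  rw [List.getElem?_set]
  by_cases hi : i < n * n
  · rw [gridOf_get_div_mod n (fun r' c' => if r' = r ∧ c' = c then v else f r' c') hi]
    by_cases he : r * n + c = i
    · rw [if_pos he, if_pos (by rw [length_gridOf]; omega)]
      obtain ⟨ha, hb⟩ := (Nat.div_mod_unique hn).mpr (⟨by rw [← he]; ring, hc⟩ :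
        c + n * r = i ∧ c < n)
      simp [ha, hb]
    · rw [if_neg he, gridOf_get_div_mod n f hi]
      have hne : ¬ (i / n = r ∧ i % n = c) := by
        rintro ⟨h1, h2⟩
        apply he
        rw [← h1, ← h2, Nat.mul_comm]
        exact Nat.div_add_mod i n
      simp only [if_neg hne]
  · rw [if_neg (by intro he; have := rc_lt n r c hr hc; omega),
      List.getElem?_eq_none (by rw [length_gridOf]; omega),
      List.getElem?_eq_none (by rw [length_gridOf]; omega)]

theorem meanA_eq_meanB (a b : String) : meanA [some a, some b] = meanB [a, b] := rfl

-- the color of pixel (r, c), as B computes it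
def cellB (colors : List String) (r c : Nat) : Option String :=
  if r ≤ c then cellUp colors (c - r) r else cellDown colors (r - c) c

theorem cellB_diag (colors : List String) (r : Nat) :
    cellB colors r r = PySem.List.pyGet? colors (r : Int) := by
  simp [cellB, cellUp]

theorem cellB_up (colors : List String) (r c : Nat) (h : r < c) :
    cellB colors r c = match cellB colors r (c - 1), cellB colors (r + 1) c with
      | some a, some b => some (meanB [a, b])
      | _, _ => none := by
  have h1 : c - r = (c - 1 - r) + 1 := by omega
  have h2 : c - (r + 1) = c - 1 - r := by omega
  rw [cellB, if_pos (by omega), h1, cellUp, cellB, if_pos (by omega),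
    cellB, if_pos (by omega), h2]

theorem cellB_down (colors : List String) (r c : Nat) (h : c < r) :
    cellB colors r c = match cellB colors r (c + 1), cellB colors (r - 1) c with
      | some a, some b => some (meanB [a, b])
      | _, _ => none := by
  have h1 : r - c = (r - 1 - c) + 1 := by omega
  rw [cellB, if_neg (by omega), h1, cellDown]
  rcases Nat.lt_or_ge (c + 1) r with h2 | h2
  · rw [cellB, if_neg (by omega), cellB, if_neg (by omega),
      show r - (c + 1) = r - 1 - c from by omega,
      show r - 1 - c = (r - 1) - c from rfl]
  · have hrc : r = c + 1 := by omega
    subst hrc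
    simp [cellB, cellUp, cellDown]

theorem cellB_isSome_aux (colors : List String) (d : Nat) : ∀ r c : Nat, Nat.dist r c = d →
    r < colors.length → c < colors.length → (cellB colors r c).isSome := by
  induction d using Nat.strong_induction_on with
  | _ d ih =>
    intro r c hd hr hc
    rcases Nat.lt_trichotomy r c with h | h | h
    · have h1 := ih (Nat.dist r (c - 1)) (by simp [Nat.dist] at *; omega) r (c - 1) rfl hr (by omega)
      have h2 := ih (Nat.dist (r + 1) c) (by simp [Nat.dist] at *; omega) (r + 1) c rfl (by omega) hc
      obtain ⟨a, ha⟩ := Option.isSome_iff_exists.mp h1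
      obtain ⟨b, hb⟩ := Option.isSome_iff_exists.mp h2
      rw [cellB_up colors r c h, ha, hb]; rfl
    · rw [h, cellB_diag, PySem.List.pyGet?_natCast]
      simp [hc]
    · have h1 := ih (Nat.dist r (c + 1)) (by simp [Nat.dist] at *; omega) r (c + 1) rfl hr (by omega)
      have h2 := ih (Nat.dist (r - 1) c) (by simp [Nat.dist] at *; omega) (r - 1) c rfl (by omega) hc
      obtain ⟨a, ha⟩ := Option.isSome_iff_exists.mp h1
      obtain ⟨b, hb⟩ := Option.isSome_iff_exists.mp h2
      rw [cellB_down colors r c h, ha, hb]; rfl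

theorem cellB_isSome (colors : List String) (r c : Nat)
    (hr : r < colors.length) (hc : c < colors.length) : (cellB colors r c).isSome :=
  cellB_isSome_aux colors (Nat.dist r c) r c rfl hr hc

-- the partially filled grid: cells at Chebyshev distance < K from the diagonal, plus the
-- first m distance-K pairs of the layer currently being processed by A's main loop
def partFill (colors : List String) (K m r c : Nat) : Option String :=
  if Nat.dist r c < K ∨ (Nat.dist r c = K ∧ min r c < m) then cellB colors r c else none

-- A's initial color_map is the all-None grid
theorem repeat_none (n : Nat) :
    (PySem.List.pyRepeat [(none : Option String)] ((n : Int) ^ 2))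
      = gridOf n (fun _ _ => none) := by
  rw [PySem.List.pyRepeat_singleton]
  have h : ((n : Int) ^ 2).toNat = n * n := by
    have : ((n : Int) ^ 2) = ((n * n : Nat) : Int) := by push_cast; ring
    rw [this, Int.toNat_natCast]
  rw [h]
  apply List.ext_getElem?
  intro i
  rw [List.getElem?_replicate]
  by_cases hi : i < n * n
  · rw [if_pos hi, gridOf_get_div_mod n _ hi]
  · rw [if_neg hi, List.getElem?_eq_none (by rw [length_gridOf]; omega)]

def diagF (colors : List String) (t r c : Nat) : Option String :=
  if r = c ∧ r < t then cellB colors r c else none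

-- A's diagonal-filling loop, processed up to column t
theorem init_fold (colors : List String) (t : Nat) (ht : t ≤ colors.length) :
    (List.map (fun (j : Nat) => (j : Int)) (List.range t)).foldl
        (initStep (colors.length : Int) colors) (gridOf colors.length (fun _ _ => none), 0)
      = (gridOf colors.length (diagF colors t), ((t * (colors.length + 1) : Nat) : Int)) := by
  induction t with
  | zero =>
    refine Prod.ext ?_ (by simp)
    exact gridOf_congr (fun r c _ _ => by simp [diagF])
  | succ t ih =>
    have ht' : t ≤ colors.length := by omega
    rw [List.range_succ, List.map_append, List.foldl_append, ih ht']
    simp only [List.map_cons, List.map_nil, List.foldl_cons, List.foldl_nil, initStep]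
    refine Prod.ext ?_ (by simp only; push_cast; ring)
    simp only
    have hsplit : t * (colors.length + 1) = t * colors.length + t := by ring
    rw [hsplit, PySem.List.pySetD_natCast, gridOf_set (diagF colors t) (by omega) (by omega)]
    apply gridOf_congr
    intro r' c' _ _
    simp only [diagF]
    by_cases h : r' = t ∧ c' = t
    · obtain ⟨rfl, rfl⟩ := h
      rw [if_pos ⟨rfl, rfl⟩, if_pos ⟨rfl, by omega⟩, cellB_diag]
    · rw [if_neg h]
      by_cases h2 : r' = c' ∧ r' < t
      · rw [if_pos h2, if_pos ⟨h2.1, by omega⟩]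
      · rw [if_neg h2, if_neg (by rintro ⟨rfl, hlt⟩; exact h2 ⟨rfl, by omega⟩)]

-- one step of A's main loop, on the pair of cells (m, m+k) / (m+k, m)
theorem step_layer (colors : List String) (k m : Nat) (hk : 1 ≤ k)
    (hkn : k < colors.length) (hm : m < colors.length - k) :
    stepA (colors.length : Int) (gridOf colors.length (partFill colors k m))
        (((m * colors.length + (m + k) : Nat) : Int), (((m + k) * colors.length + m : Nat) : Int))
      = gridOf colors.length (partFill colors k (m + 1)) := by
  obtain ⟨j, rfl⟩ : ∃ j, k = j + 1 := ⟨k - 1, by omega⟩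
  have hdist : ∀ x y : Nat, Nat.dist x (x + y) = y := fun x y => by simp [Nat.dist]
  have hdist' : ∀ x y : Nat, Nat.dist (x + y) x = y := fun x y => by simp [Nat.dist]
  set n := colors.length with hn
  have hmn : m < n := by omega
  have hm1n : m + 1 < n := by omega
  have hmjn : m + j < n := by omega
  have hmj1n : m + (j + 1) < n := by omega
  obtain ⟨a1, ha1⟩ := Option.isSome_iff_exists.mp (cellB_isSome colors m (m + j) hmn hmjn)
  obtain ⟨a2, ha2⟩ :=
    Option.isSome_iff_exists.mp (cellB_isSome colors (m + 1) (m + (j + 1)) hm1n hmj1n)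
  obtain ⟨b1, hb1⟩ :=
    Option.isSome_iff_exists.mp (cellB_isSome colors (m + (j + 1)) (m + 1) hmj1n hm1n)
  obtain ⟨b2, hb2⟩ := Option.isSome_iff_exists.mp (cellB_isSome colors (m + j) m hmjn hmn)
  have hv1 : cellB colors m (m + (j + 1)) = some (meanB [a1, a2]) := by
    rw [cellB_up colors _ _ (by omega), show m + (j + 1) - 1 = m + j from by omega, ha1, ha2]
  have hv2 : cellB colors (m + (j + 1)) m = some (meanB [b1, b2]) := by
    rw [cellB_down colors _ _ (by omega), show m + (j + 1) - 1 = m + j from by omega, hb1, hb2]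
  simp only [stepA]
  have e1 : ((↑(m * n + (m + (j + 1))) : Int) - 1) = ((m * n + (m + j) : Nat) : Int) := by
    push_cast; ring
  have e2 : ((↑(m * n + (m + (j + 1))) : Int) + ↑n)
      = (((m + 1) * n + (m + (j + 1)) : Nat) : Int) := by push_cast; ring
  rw [e1, e2, gridOf_getD _ hmn hmjn, gridOf_getD _ hm1n hmj1n]
  have p1 : partFill colors (j + 1) m m (m + j) = some a1 := by
    simp only [partFill]; rw [if_pos (Or.inl (by rw [hdist]; omega))]; exact ha1
  have p2 : partFill colors (j + 1) m (m + 1) (m + (j + 1)) = some a2 := by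
    simp only [partFill]
    rw [if_pos (Or.inl (by rw [show m + (j + 1) = (m + 1) + j from by omega, hdist]; omega))]
    exact ha2
  rw [p1, p2, meanA_eq_meanB, ← hv1]
  have e3 : ((↑((m + (j + 1)) * n + m) : Int) + 1) = (((m + (j + 1)) * n + (m + 1) : Nat) : Int) := by
    push_cast; ring
  have e4 : ((↑((m + (j + 1)) * n + m) : Int) - ↑n) = (((m + j) * n + m : Nat) : Int) := by
    push_cast; ring
  rw [e3, e4,
    PySem.List.pySetD_natCast (gridOf n (partFill colors (j + 1) m)) (m * n + (m + (j + 1)))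
      (cellB colors m (m + (j + 1))),
    gridOf_set (partFill colors (j + 1) m) hmn hmj1n,
    gridOf_getD _ hmj1n hm1n, gridOf_getD _ hmjn hmn]
  rw [if_neg (by omega), if_neg (by omega)]
  have p3 : partFill colors (j + 1) m (m + (j + 1)) (m + 1) = some b1 := by
    simp only [partFill]
    rw [if_pos (Or.inl (by rw [show m + (j + 1) = (m + 1) + j from by omega, hdist']; omega))]
    exact hb1
  have p4 : partFill colors (j + 1) m (m + j) m = some b2 := by
    simp only [partFill]; rw [if_pos (Or.inl (by rw [hdist']; omega))]; exact hb2
  rw [p3, p4, meanA_eq_meanB, ← hv2, PySem.List.pySetD_natCast, gridOf_set _ hmj1n hmn]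
  apply gridOf_congr
  intro r' c' hr' hc'
  by_cases hA : r' = m + (j + 1) ∧ c' = m
  · obtain ⟨rfl, rfl⟩ := hA
    rw [if_pos ⟨rfl, rfl⟩]
    simp only [partFill]
    rw [if_pos (Or.inr ⟨by rw [hdist'], by omega⟩)]
  · rw [if_neg hA]
    by_cases hB : r' = m ∧ c' = m + (j + 1)
    · obtain ⟨rfl, rfl⟩ := hB
      rw [if_pos ⟨rfl, rfl⟩]
      simp only [partFill]
      rw [if_pos (Or.inr ⟨by rw [hdist], by omega⟩)]
    · rw [if_neg hB]
      simp only [partFill, Nat.dist, Nat.min_def]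
      split_ifs <;> first | rfl | (exfalso; omega)

-- A's inner comprehension for a fixed k, as the list of processed cell pairs
theorem layer_list (n k : Nat) (hk : 1 ≤ k) (hkn : k ≤ n) :
    (PySem.List.pyRange (k : Int) ((n : Int) ^ 2 - (n : Int) * (k : Int)) ((n : Int) + 1)).map
        (fun i => (i, i + ((n : Int) - 1) * (k : Int)))
      = (List.range (n - k)).map
        (fun m => (((m * n + (m + k) : Nat) : Int), (((m + k) * n + m : Nat) : Int))) := by
  rw [PySem.List.pyRange_of_pos _ _ (by omega : (0 : Int) < (n : Int) + 1)]
  rcases Nat.lt_or_ge k n with hlt | hge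
  · have hcond : (k : Int) < (n : Int) ^ 2 - (n : Int) * (k : Int) := by
      have h1 : k * (n + 1) < n * n := by nlinarith
      have h2 : ((k * (n + 1) : Nat) : Int) < ((n * n : Nat) : Int) := by exact_mod_cast h1
      push_cast at h2
      nlinarith
    rw [if_pos hcond]
    have hnum : (n : Int) ^ 2 - (n : Int) * (k : Int) - (k : Int) + ((n : Int) + 1) - 1
        = ((n - k : Nat) : Int) * ((n : Int) + 1) := by
      push_cast [Nat.cast_sub hkn]
      ring
    rw [hnum, Int.mul_ediv_cancel _ (by omega), Int.toNat_natCast, List.map_map]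
    apply List.map_congr_left
    intro m hm
    simp only [Function.comp_apply, Prod.mk.injEq]
    constructor <;> (push_cast; ring)
  · have hkn' : k = n := by omega
    subst hkn'
    rw [if_neg (by nlinarith [sq_nonneg ((k : Int))]), Nat.sub_self]
    simp

-- folding A's main loop over one complete layer k
theorem layer_fold (colors : List String) (k : Nat) (hk : 1 ≤ k) (hkn : k ≤ colors.length) :
    ((List.range (colors.length - k)).map
        (fun m => (((m * colors.length + (m + k) : Nat) : Int),
          (((m + k) * colors.length + m : Nat) : Int)))).foldl
        (stepA (colors.length : Int)) (gridOf colors.length (partFill colors k 0))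
      = gridOf colors.length (partFill colors (k + 1) 0) := by
  have haux : ∀ t, t ≤ colors.length - k →
      ((List.range t).map
          (fun m => (((m * colors.length + (m + k) : Nat) : Int),
            (((m + k) * colors.length + m : Nat) : Int)))).foldl
          (stepA (colors.length : Int)) (gridOf colors.length (partFill colors k 0))
        = gridOf colors.length (partFill colors k t) := by
    intro t
    induction t with
    | zero => intro _; rfl
    | succ t ih =>
      intro ht
      rw [List.range_succ, List.map_append, List.foldl_append, ih (by omega)]
      simp only [List.map_cons, List.map_nil, List.foldl_cons, List.foldl_nil]
      exact step_layer colors k t hk (by omega) (by omega)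
  rw [haux (colors.length - k) le_rfl]
  apply gridOf_congr
  intro r c hr hc
  simp only [partFill]
  have hd : Nat.dist r c = (r - c) + (c - r) := by simp [Nat.dist]
  rcases Nat.le_total r c with hrc | hrc <;>
    · split_ifs with h1 h2 <;> first
      | rfl
      | (exfalso; rw [hd] at *; rw [Nat.min_def] at *; split_ifs at * <;> omega)

-- folding A's main loop over the first K layers
theorem layers_fold (colors : List String) (K : Nat) (hK : K ≤ colors.length) :
    ((List.map (fun (j : Nat) => (1 : Int) + (j : Int)) (List.range K)).flatMap
        (fun kk => (PySem.List.pyRange kk ((colors.length : Int) ^ 2 - (colors.length : Int) * kk)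
            ((colors.length : Int) + 1)).map
          (fun i => (i, i + ((colors.length : Int) - 1) * kk)))).foldl
        (stepA (colors.length : Int)) (gridOf colors.length (partFill colors 1 0))
      = gridOf colors.length (partFill colors (K + 1) 0) := by
  induction K with
  | zero => rfl
  | succ K ih =>
    rw [List.range_succ, List.map_append, List.flatMap_append, List.foldl_append, ih (by omega)]
    simp only [List.map_cons, List.map_nil, List.flatMap_cons, List.flatMap_nil, List.append_nil]
    have hc : ((1 : Int) + (K : Int)) = ((K + 1 : Nat) : Int) := by push_cast; ring
    rw [hc, layer_list colors.length (K + 1) (by omega) hK,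
      layer_fold colors (K + 1) (by omega) hK]

-- the outer comprehension range, range(1, len_colors + 1)
theorem outer_range (n : Nat) :
    PySem.List.pyRange 1 ((n : Int) + 1) 1
      = List.map (fun (j : Nat) => (1 : Int) + (j : Int)) (List.range n) := by
  rw [PySem.List.pyRange_of_pos _ _ one_pos]
  rcases Nat.eq_zero_or_pos n with h | h
  · subst h; simp
  · rw [if_pos (by omega : (1 : Int) < (n : Int) + 1),
      show ((n : Int) + 1 - 1 + 1 - 1) = (n : Int) from by ring, Int.ediv_one,
      Int.toNat_natCast]
    apply List.map_congr_left
    intro k _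
    ring

-- ===== VERDICT (by name: the statement is the Claim_ definition above) =====
theorem get_slant_pixel_map_spec : Claim_equal_get_slant_pixel_map := by
  intro colors _
  show get_slant_pixel_map colors = get_slant_pixel_map_alt colors
  have hdiag : gridOf colors.length (diagF colors colors.length)
      = gridOf colors.length (partFill colors 1 0) := by
    apply gridOf_congr
    intro r c hr hc
    simp only [diagF, partFill, Nat.dist, Nat.min_def]
    split_ifs <;> first | rfl | (exfalso; omega)
  have hfin : gridOf colors.length (partFill colors (colors.length + 1) 0)
      = gridOf colors.length (fun r c => cellB colors r c) := by
    apply gridOf_congr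
    intro r c hr hc
    simp only [partFill, Nat.dist]
    rw [if_pos (Or.inl (by omega))]
  simp only [get_slant_pixel_map]
  rw [PySem.List.pyRange_zero_natCast, repeat_none colors.length,
    init_fold colors colors.length le_rfl]
  rw [hdiag, outer_range colors.length, layers_fold colors colors.length le_rfl, hfin]
  rfl
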